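-- pv_equiv track=rewrite | github.com/cym9812/automatic-computing-machine | 基础练习/Assignment/314/16QAMdecode.py | transform
-- ===== SOURCE A (Python) =====
-- positiontoascii = {(1, 1): "1101", (1, 3): "1100", (3, 1): "1001", (3, 3): "1000", (-1, -1): "0111", (-1, -3): "0110",
--                    (-3, -1): "0011", (-3, -3): "0010", (1, -1): "1111", (1, -3): "1110", (3, -1): "1011",
--                    (3, -3): "1010", (-1, 1): "0101", (-1, 3): "0100", (-3, 1): "0001", (-3, 3): "0000"}
--
-- def transform(data):
--     bin_data = ""
--     result = ""
--     for i in data: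
--         if i not in positiontoascii:
--             bin_data += "????"
--         else:
--             bin_data += positiontoascii[i]
--     index = 0
--     while index < len(bin_data):
--         temp = bin_data[index:index+8]
--         if "?" in temp:
--             result += "_"
--         else:
--             result += chr(int(temp,2))
--         index += 8
--     return result
-- ===== SOURCE B (Python) =====
-- positiontoascii = {(1, 1): "1101", (1, 3): "1100", (3, 1): "1001", (3, 3): "1000", (-1, -1): "0111", (-1, -3): "0110",
--                    (-3, -1): "0011", (-3, -3): "0010", (1, -1): "1111", (1, -3): "1110", (3, -1): "1011",
--                    (3, -3): "1010", (-1, 1): "0101", (-1, 3): "0100", (-3, 1): "0001", (-3, 3): "0000"}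
--
-- def transform(data):
--     # one pass over symbol PAIRS; no intermediate flat bit-string
--     out = []
--     get = positiontoascii.get
--     for k in range(0, len(data), 2):
--         codes = [get(sym) for sym in data[k:k + 2]]
--         if None in codes:
--             out.append('_')
--         else:
--             out.append(chr(int(''.join(codes), 2)))
--     return ''.join(out)
-- ===== Notes on version B (the rewrite author's own statement) =====
-- stated objective: alternative
-- what changed: B decodes the symbols pairwise in a single pass (combining the two 4-bit codes of each pair directly into one character, with the odd trailing symbol decoded as a 4-bit value), instead of first concatenating all codes into a flat bit-string and then re-scanning it in 8-bit chunks.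
import Mathlib
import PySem

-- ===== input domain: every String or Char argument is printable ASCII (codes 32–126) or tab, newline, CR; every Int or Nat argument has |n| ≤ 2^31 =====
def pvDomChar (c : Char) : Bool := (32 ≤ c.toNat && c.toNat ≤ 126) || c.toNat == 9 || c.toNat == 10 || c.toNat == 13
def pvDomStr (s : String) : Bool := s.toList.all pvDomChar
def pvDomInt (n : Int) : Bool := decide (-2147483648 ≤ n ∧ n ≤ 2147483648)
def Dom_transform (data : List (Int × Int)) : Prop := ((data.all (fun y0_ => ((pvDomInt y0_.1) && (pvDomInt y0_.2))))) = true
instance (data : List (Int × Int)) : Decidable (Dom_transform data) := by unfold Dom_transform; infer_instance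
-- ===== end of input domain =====

-- B fuses the two passes of A into one pass over symbol PAIRS, never building the
-- intermediate flat bit-string (objective: alternative decomposition, same cost).

-- shared module-level constant: the 16QAM position → 4-bit-code dict
def ptoaList : List ((Int × Int) × String) :=
  [((1, 1), "1101"), ((1, 3), "1100"), ((3, 1), "1001"), ((3, 3), "1000"),
   ((-1, -1), "0111"), ((-1, -3), "0110"), ((-3, -1), "0011"), ((-3, -3), "0010"),
   ((1, -1), "1111"), ((1, -3), "1110"), ((3, -1), "1011"), ((3, -3), "1010"),
   ((-1, 1), "0101"), ((-1, 3), "0100"), ((-3, 1), "0001"), ((-3, 3), "0000")]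

-- the 16 keys are distinct, so the dict literal's items list is ptoaList itself
def ptoa : PySem.Dict (Int × Int) String := PySem.Dict.mk ptoaList

-- int(s, 2) on a string of '0'/'1' characters (both Pythons apply it only to such strings)
def binVal (cs : List Char) : Nat := cs.foldl (fun a c => 2 * a + (if c = '1' then 1 else 0)) 0

-- ===== PORT A =====
-- the 4 chars A's first loop appends for one symbol ("????" if not in the dict)
def binOf (i : Int × Int) : List Char :=
  match ptoa.get? i with
  | none => "????".toList
  | some s => s.toList

-- A's while loop: temp = bin_data[index:index+8]; '_' if it contains '?' else chr(int(temp,2))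
def aLoop (bin : List Char) : List Char :=
  if h : bin = [] then []
  else (if '?' ∈ bin.take 8 then '_' else Char.ofNat (binVal (bin.take 8))) :: aLoop (bin.drop 8)
termination_by bin.length
decreasing_by
  have hp : 0 < bin.length := List.length_pos_of_ne_nil h
  simp [List.length_drop]; omega

def transform (data : List (Int × Int)) : String :=
  String.ofList (aLoop (data.foldl (fun acc i => acc ++ binOf i) []))

-- ===== PORT B =====
-- one pass over the symbols two at a time (Source B's range(0, len(data), 2) loop)
def bLoop : List (Int × Int) → List Char
  | [] => []
  | [x] =>
    [match ptoa.get? x with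
     | none => '_'
     | some s => Char.ofNat (binVal s.toList)]
  | x :: y :: rest =>
    (match ptoa.get? x, ptoa.get? y with
     | some s, some t => Char.ofNat (binVal (s.toList ++ t.toList))
     | _, _ => '_') :: bLoop rest

def transform_alt (data : List (Int × Int)) : String := String.ofList (bLoop data)

-- ===== PRECONDITION & SPEC =====
def Spec_transform (data : List (Int × Int)) (out : String) : Prop := out = transform_alt data
instance (data : List (Int × Int)) (out : String) : Decidable (Spec_transform data out) := by unfold Spec_transform; infer_instance

-- ===== CLAIM (what is proved, stated in full; the proofs are below) =====
def Claim_equal_transform : Prop := ∀ (data : List (Int × Int)), Dom_transform data → Spec_transform data (transform data)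

-- ===== LEMMAS AND PROOFS =====

-- any string stored in the dict has 4 chars, none of them '?'
lemma ptoa_val_spec (p : Int × Int) (s : String) (h : ptoa.get? p = some s) :
    s.toList.length = 4 ∧ '?' ∉ s.toList := by
  have hm := PySem.Dict.mem_items_of_get?_eq_some ptoa h
  simp [ptoa, ptoaList, Prod.ext_iff] at hm
  rcases hm with ⟨_, rfl⟩ | ⟨_, rfl⟩ | ⟨_, rfl⟩ | ⟨_, rfl⟩ | ⟨_, rfl⟩ | ⟨_, rfl⟩ | ⟨_, rfl⟩ |
    ⟨_, rfl⟩ | ⟨_, rfl⟩ | ⟨_, rfl⟩ | ⟨_, rfl⟩ | ⟨_, rfl⟩ | ⟨_, rfl⟩ | ⟨_, rfl⟩ | ⟨_, rfl⟩ | ⟨_, rfl⟩ <;> decide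

lemma binOf_length (i : Int × Int) : (binOf i).length = 4 := by
  unfold binOf
  cases h : ptoa.get? i with
  | none => decide
  | some s => exact (ptoa_val_spec i s h).1

lemma binOf_qmark (i : Int × Int) : '?' ∈ binOf i ↔ ptoa.get? i = none := by
  unfold binOf
  cases h : ptoa.get? i with
  | none => simp
  | some s => simp [(ptoa_val_spec i s h).2]

lemma aLoop_flatMap (data : List (Int × Int)) : aLoop (data.flatMap binOf) = bLoop data := by
  induction data using bLoop.induct with
  | case1 => rw [List.flatMap_nil, aLoop.eq_def]; simp [bLoop]
  | case2 x =>
    have h4 : (binOf x).length = 4 := binOf_length x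
    have hne : binOf x ≠ [] := by intro h; rw [h] at h4; simp at h4
    rw [List.flatMap_cons, List.flatMap_nil, List.append_nil]
    rw [aLoop.eq_def, dif_neg hne]
    have ht : (binOf x).take 8 = binOf x := List.take_of_length_le (by omega)
    have hd : (binOf x).drop 8 = [] := List.drop_eq_nil_of_le (by omega)
    rw [ht, hd, aLoop.eq_def, dif_pos rfl]
    simp only [bLoop]
    cases h : ptoa.get? x with
    | none =>
      have : '?' ∈ binOf x := (binOf_qmark x).mpr h
      simp [this]
    | some s =>
      have hq : ¬ '?' ∈ binOf x := by rw [binOf_qmark, h]; simp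
      have hb : binOf x = s.toList := by unfold binOf; rw [h]
      rw [hb] at hq
      simp [hb, hq]
  | case3 x y rest ih =>
    have hx4 : (binOf x).length = 4 := binOf_length x
    have hy4 : (binOf y).length = 4 := binOf_length y
    have hL : ((x :: y :: rest).flatMap binOf) = (binOf x ++ binOf y) ++ rest.flatMap binOf := by
      simp [List.flatMap_cons, List.append_assoc]
    have hlen : (binOf x ++ binOf y).length = 8 := by simp [hx4, hy4]
    have hne : (binOf x ++ binOf y) ++ rest.flatMap binOf ≠ [] := by
      intro h
      have hl := congrArg List.length h
      rw [List.length_append, hlen] at hl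
      simp only [List.length_nil] at hl
      omega
    rw [hL, aLoop.eq_def, dif_neg hne]
    have ht : ((binOf x ++ binOf y) ++ rest.flatMap binOf).take 8 = binOf x ++ binOf y := by
      rw [List.take_append_of_le_length (by omega), List.take_of_length_le (by omega)]
    have hd : ((binOf x ++ binOf y) ++ rest.flatMap binOf).drop 8 = rest.flatMap binOf := by
      rw [List.drop_append_of_le_length (by omega), List.drop_eq_nil_of_le (by omega),
        List.nil_append]
    rw [ht, hd, ih]
    simp only [bLoop]
    have hq : '?' ∈ binOf x ++ binOf y ↔ ptoa.get? x = none ∨ ptoa.get? y = none := by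
      rw [List.mem_append, binOf_qmark, binOf_qmark]
    cases hgx : ptoa.get? x with
    | none => simp [hq, hgx]
    | some s =>
      cases hgy : ptoa.get? y with
      | none => simp [hq, hgx, hgy]
      | some t =>
        have hq' : ¬ '?' ∈ binOf x ++ binOf y := by simp [hq, hgx, hgy]
        have hbx : binOf x = s.toList := by unfold binOf; rw [hgx]
        have hby : binOf y = t.toList := by unfold binOf; rw [hgy]
        rw [hbx, hby, List.mem_append] at hq'
        have hqs : '?' ∉ s.toList := fun hc => hq' (Or.inl hc)
        have hqt : '?' ∉ t.toList := fun hc => hq' (Or.inr hc)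
        simp [hbx, hby, hqs, hqt]

-- ===== VERDICT (by name: the statement is the Claim_ definition above) =====
theorem transform_spec : Claim_equal_transform := by
  intro data _
  unfold Spec_transform transform transform_alt
  rw [PySem.List.foldl_append_eq_flatMap, List.nil_append, aLoop_flatMap]
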